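-- pv_equiv track=rewrite | github.com/Furina-star/League-of-Legends-Analyst-Discord-bot | cogs/draft_commands.py | _find_duos
-- ===== SOURCE A (Python) =====
-- def _find_duos(player_histories: list) -> set:
--     duos = set()
--     # Compare every player's match history against every other player's history
--     for i in range(len(player_histories)):
--         for j in range(i + 1, len(player_histories)):
--             p1_id, p1_matches = player_histories[i]
--             p2_id, p2_matches = player_histories[j]
--
--             # If the lists intersect (share a Match ID), they're playing together lol
--             if p1_matches and p2_matches:
--                 shared_games = set(p1_matches).intersection(p2_matches)
--
--                 if len(shared_games) >= 2:  # If they have 2 or more shared games in their recent history, they're probably duos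
--                     duos.add(p1_id)
--                     duos.add(p2_id)
--     return duos
-- ===== SOURCE B (Python) =====
-- def _find_duos(player_histories: list) -> set:
--     n = len(player_histories)
--     # Inverted index pass: holders maps a match id to the positions (in order) of
--     # players whose history contains it; counts[(i, j)] (i < j) accumulates the
--     # number of distinct match ids players i and j share.
--     holders = {}
--     counts = {}
--     for pos in range(n):
--         _, matches = player_histories[pos]
--         for m in set(matches):
--             for prev in holders.get(m, []):
--                 counts[(prev, pos)] = counts.get((prev, pos), 0) + 1
--             holders.setdefault(m, []).append(pos)
--     duos = set()
--     for i in range(n):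
--         for j in range(i + 1, n):
--             if counts.get((i, j), 0) >= 2:
--                 duos.add(player_histories[i][0])
--                 duos.add(player_histories[j][0])
--     return duos
-- ===== Notes on version B (the rewrite author's own statement) =====
-- stated objective: faster
-- what changed: A intersects every pair of players' match-id sets (O(n^2) set intersections); B makes one pass over all players' distinct match ids, maintaining an inverted index match_id -> holders and a pair counter, so each pair's shared count is accumulated only from actual co-occurrences.
import Mathlib
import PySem

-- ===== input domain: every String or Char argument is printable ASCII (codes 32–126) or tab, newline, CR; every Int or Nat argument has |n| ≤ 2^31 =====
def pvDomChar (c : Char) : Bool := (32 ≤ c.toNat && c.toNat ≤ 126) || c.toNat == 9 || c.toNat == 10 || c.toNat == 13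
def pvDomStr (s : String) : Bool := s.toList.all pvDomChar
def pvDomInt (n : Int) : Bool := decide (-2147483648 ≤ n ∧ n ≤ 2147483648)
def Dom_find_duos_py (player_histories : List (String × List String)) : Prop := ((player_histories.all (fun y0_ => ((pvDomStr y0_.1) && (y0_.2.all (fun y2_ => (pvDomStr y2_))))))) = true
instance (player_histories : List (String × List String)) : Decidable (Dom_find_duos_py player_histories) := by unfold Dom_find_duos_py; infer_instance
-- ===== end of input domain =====

-- B replaces A's pairwise set intersections by one inverted-index pass (match id -> holders)
-- that counts each pair's shared distinct match ids once.

-- ===== PORT A =====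
def find_duos_py (player_histories : List (String × List String)) : List String :=
  (List.range player_histories.length).foldl (fun duos i =>
    (List.range' (i + 1) (player_histories.length - (i + 1))).foldl (fun duos j =>
      let p1 := player_histories.getD i ("", [])
      let p2 := player_histories.getD j ("", [])
      -- 'if p1_matches and p2_matches:' — Python truthiness of the two lists
      if p1.2 ≠ [] ∧ p2.2 ≠ [] then
        let shared := PySem.Set.inter (PySem.Set.ofList p1.2) p2.2
        if 2 ≤ shared.length then PySem.Set.add (PySem.Set.add duos p1.1) p2.1 else duos
      else duos) duos)
    PySem.Set.empty

-- ===== PORT B =====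
-- B's innermost work for match id m of player `pos`: bump the pair counter with every
-- earlier holder of m ('for prev in holders.get(m, [])'), then append pos to m's holder list
def pvStep (pos : Nat) (st : PySem.Dict String (List Nat) × PySem.Dict (Nat × Nat) Int)
    (m : String) : PySem.Dict String (List Nat) × PySem.Dict (Nat × Nat) Int :=
  let counts := (st.1.getD m []).foldl
    (fun c prev => c.insert (prev, pos) (c.getD (prev, pos) 0 + 1)) st.2
  (st.1.modify m [] (fun l => l ++ [pos]), counts)

def find_duos_py_alt (player_histories : List (String × List String)) : List String :=
  let n := player_histories.length
  let hc := (List.range n).foldl (fun st pos =>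
      (PySem.Set.ofList (player_histories.getD pos ("", [])).2).foldl (pvStep pos) st)
    (PySem.Dict.empty, PySem.Dict.empty)
  (List.range n).foldl (fun duos i =>
    (List.range' (i + 1) (n - (i + 1))).foldl (fun duos j =>
      if 2 ≤ hc.2.getD (i, j) 0 then
        PySem.Set.add (PySem.Set.add duos (player_histories.getD i ("", [])).1)
          (player_histories.getD j ("", [])).1
      else duos) duos)
    PySem.Set.empty

-- ===== PRECONDITION & SPEC =====
def Spec_find_duos_py (player_histories : List (String × List String)) (out : List String) : Prop := out = find_duos_py_alt player_histories
instance (player_histories : List (String × List String)) (out : List String) : Decidable (Spec_find_duos_py player_histories out) := by unfold Spec_find_duos_py; infer_instance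

-- ===== CLAIM (what is proved, stated in full; the proofs are below) =====
def Claim_equal_find_duos_py : Prop := ∀ (player_histories : List (String × List String)), Dom_find_duos_py player_histories → Spec_find_duos_py player_histories (find_duos_py player_histories)

-- ===== LEMMAS AND PROOFS =====

-- matches of the player at position p
def pvMtch (ph : List (String × List String)) (p : Nat) : List String :=
  (ph.getD p ("", [])).2

theorem pvCount_pair (prevs : List Nat) (k i j : Nat) :
    List.count (i, j) (prevs.map (fun p => (p, k))) = if j = k then prevs.count i else 0 := by
  have hinj : Function.Injective (fun p : Nat => (p, k)) := fun a b hab => by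
    simpa using congrArg Prod.fst hab
  split
  · next hj =>
    subst hj
    exact List.count_map_of_injective prevs _ hinj i
  · next hj =>
    rw [List.count_eq_zero]
    simp only [List.mem_map]
    rintro ⟨p, _, hp⟩
    exact hj (congrArg Prod.snd hp).symm

theorem pvStep_fold (k : Nat) (D : List String) (hD : D.Nodup)
    (h : PySem.Dict String (List Nat)) (c : PySem.Dict (Nat × Nat) Int) :
    (∀ m, (D.foldl (pvStep k) (h, c)).1.getD m []
        = h.getD m [] ++ (if m ∈ D then [k] else []))
    ∧ (∀ i j, (D.foldl (pvStep k) (h, c)).2.getD (i, j) 0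
        = c.getD (i, j) 0
          + if j = k then (D.map (fun m => (((h.getD m []).count i : Int)))).sum else 0) := by
  induction D generalizing h c with
  | nil => simp
  | cons m D ih =>
    have hmD : m ∉ D := (List.nodup_cons.mp hD).1
    have hN : D.Nodup := (List.nodup_cons.mp hD).2
    have hstep : pvStep k (h, c) m
        = (h.modify m [] (fun l => l ++ [k]),
           (h.getD m []).foldl (fun c prev => c.insert (prev, k) (c.getD (prev, k) 0 + 1)) c) := rfl
    obtain ⟨ih1, ih2⟩ := ih hN (h.modify m [] (fun l => l ++ [k]))
      ((h.getD m []).foldl (fun c prev => c.insert (prev, k) (c.getD (prev, k) 0 + 1)) c)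
    constructor
    · intro m'
      rw [List.foldl_cons, hstep, ih1 m', PySem.Dict.getD_modify]
      by_cases hmm : m' = m
      · subst hmm
        simp [hmD]
      · rw [if_neg hmm]
        simp [hmm]
    · intro i j
      rw [List.foldl_cons, hstep, ih2 i j]
      have hc' : ((h.getD m []).foldl (fun c prev => c.insert (prev, k) (c.getD (prev, k) 0 + 1)) c).getD (i, j) 0
          = c.getD (i, j) 0 + if j = k then ((h.getD m []).count i : Int) else 0 := by
        have := PySem.Dict.getD_foldl_insert_add_one ((h.getD m []).map (fun p => (p, k))) c (i, j)
        rw [List.foldl_map] at this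
        rw [this, pvCount_pair]
        split <;> simp
      rw [hc']
      have hDcongr : (D.map (fun m' => (((h.modify m [] (fun l => l ++ [k])).getD m' []).count i : Int))).sum
          = (D.map (fun m' => (((h.getD m' []).count i : Int)))).sum := by
        apply congrArg
        apply List.map_congr_left
        intro m' hm'
        rw [PySem.Dict.getD_modify]
        rw [if_neg (by rintro rfl; exact hmD hm')]
      rw [hDcongr]
      simp only [List.map_cons, List.sum_cons]
      split <;> ring

theorem pvOuter_fold (ph : List (String × List String)) (k : Nat) :
    (∀ m, ((List.range k).foldl (fun st pos =>
        (PySem.Set.ofList (pvMtch ph pos)).foldl (pvStep pos) st)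
        (PySem.Dict.empty, PySem.Dict.empty)).1.getD m []
      = (List.range k).filter (fun p => decide (m ∈ pvMtch ph p)))
    ∧ (∀ i j, ((List.range k).foldl (fun st pos =>
        (PySem.Set.ofList (pvMtch ph pos)).foldl (pvStep pos) st)
        (PySem.Dict.empty, PySem.Dict.empty)).2.getD (i, j) 0
      = if i < j ∧ j < k then
          ((PySem.Set.ofList (pvMtch ph j)).countP (fun m => decide (m ∈ pvMtch ph i)) : Int)
        else 0) := by
  induction k with
  | zero => simp
  | succ k ih =>
    obtain ⟨ih1, ih2⟩ := ih
    rw [List.range_succ]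
    simp only [List.foldl_append, List.foldl_cons, List.foldl_nil]
    set st := (List.range k).foldl (fun st pos =>
        (PySem.Set.ofList (pvMtch ph pos)).foldl (pvStep pos) st)
        (PySem.Dict.empty, PySem.Dict.empty) with hst
    obtain ⟨s1, s2⟩ := pvStep_fold k (PySem.Set.ofList (pvMtch ph k))
      (PySem.Set.nodup_ofList _) st.1 st.2
    constructor
    · intro m
      rw [s1 m, ih1 m, List.filter_append]
      simp only [PySem.Set.mem_ofList]
      by_cases h : m ∈ pvMtch ph k <;> simp [h]
    · intro i j
      rw [s2 i j, ih2 i j]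
      by_cases hjk : j = k
      · subst hjk
        rw [if_neg (by omega), if_pos rfl, zero_add]
        have hcnt : ∀ m ∈ PySem.Set.ofList (pvMtch ph j),
            (fun m => ((List.count i (st.1.getD m [])) : Int)) m
            = (fun m => if (decide (i < j) && decide (m ∈ pvMtch ph i)) = true then (1 : Int) else 0) m := by
          intro m _
          simp only []
          rw [ih1 m]
          by_cases hik : i < j
          · by_cases him : m ∈ pvMtch ph i
            · rw [List.count_eq_one_of_mem (List.Nodup.filter _ List.nodup_range)
                (by rw [List.mem_filter, List.mem_range]; exact ⟨hik, by simpa using him⟩)]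
              simp [hik, him]
            · rw [List.count_eq_zero.mpr (by rw [List.mem_filter]; simp [him])]
              simp [him]
          · rw [List.count_eq_zero.mpr (by rw [List.mem_filter, List.mem_range]; simp; omega)]
            simp [hik]
        rw [List.map_congr_left hcnt, PySem.List.sum_map_ite_one_zero]
        by_cases hik : i < j
        · rw [if_pos ⟨hik, by omega⟩]
          norm_cast
          exact List.countP_congr (by intro m _; simp [hik])
        · rw [if_neg (by omega)]
          norm_cast
          rw [List.countP_eq_zero.mpr (by intro m _; simp [hik])]
      · rw [if_neg hjk, add_zero]
        by_cases hc : i < j ∧ j < k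
        · rw [if_pos hc, if_pos ⟨hc.1, by omega⟩]
        · rw [if_neg hc, if_neg (by omega)]

theorem pvShared_symm (a b : List String) :
    (PySem.Set.inter (PySem.Set.ofList a) b).length
      = (PySem.Set.ofList b).countP (fun m => decide (m ∈ a)) := by
  have h1 : (PySem.Set.inter (PySem.Set.ofList a) b).Nodup :=
    List.Nodup.filter _ (PySem.Set.nodup_ofList a)
  have h2 : ((PySem.Set.ofList b).filter (fun m => decide (m ∈ a))).Nodup :=
    List.Nodup.filter _ (PySem.Set.nodup_ofList b)
  rw [List.countP_eq_length_filter, ← List.toFinset_card_of_nodup h1,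
    ← List.toFinset_card_of_nodup h2]
  congr 1
  ext x
  simp only [List.mem_toFinset, PySem.Set.inter, List.mem_filter, PySem.Set.mem_ofList,
    PySem.Set.contains, List.contains_eq_mem, decide_eq_true_eq]
  tauto

theorem pv_main (ph : List (String × List String)) : find_duos_py ph = find_duos_py_alt ph := by
  unfold find_duos_py find_duos_py_alt
  have h2 := (pvOuter_fold ph ph.length).2
  simp only [pvMtch] at h2
  apply PySem.List.foldl_congr_mem
  intro acc i hi
  apply PySem.List.foldl_congr_mem
  intro acc2 j hj
  rw [List.mem_range] at hi
  rw [List.mem_range'_1] at hj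
  have hij : i < j := hj.1
  have hjn : j < ph.length := by omega
  simp only []
  rw [h2 i j, if_pos (show i < j ∧ j < ph.length from ⟨hij, hjn⟩), pvShared_symm]
  simp only [show ((2 : Int)) = (((2 : Nat) : Int)) from by norm_num, Nat.cast_le]
  by_cases hc2 : 2 ≤ (PySem.Set.ofList (ph.getD j ("", [])).2).countP
      (fun m => decide (m ∈ (ph.getD i ("", [])).2))
  · have hpos : 0 < (PySem.Set.ofList (ph.getD j ("", [])).2).countP
        (fun m => decide (m ∈ (ph.getD i ("", [])).2)) := by omega
    rw [List.countP_pos_iff] at hpos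
    obtain ⟨m, hmS, hmi⟩ := hpos
    rw [decide_eq_true_eq] at hmi
    have hmj : m ∈ (ph.getD j ("", [])).2 := (PySem.Set.mem_ofList _ _).mp hmS
    simp only [if_pos hc2]
    rw [if_pos (show (ph.getD i ("", [])).2 ≠ [] ∧ (ph.getD j ("", [])).2 ≠ [] from
        ⟨List.ne_nil_of_mem hmi, List.ne_nil_of_mem hmj⟩)]
    exact (if_pos hc2).symm
  · simp only [if_neg hc2, ite_self]
    exact (if_neg hc2).symm

-- ===== VERDICT (by name: the statement is the Claim_ definition above) =====
theorem find_duos_py_spec : Claim_equal_find_duos_py := by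
  intro ph _
  show find_duos_py ph = find_duos_py_alt ph
  exact pv_main ph
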